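-- pv_equiv track=rewrite | github.com/REvDl/Algorithmic_practice | leetcode/2026/hard/maxWalls.py | maxWalls
-- ===== SOURCE A (Python) =====
-- from bisect import bisect_left, bisect_right
-- from typing import List
--
-- def maxWalls(robots: List[int], distance: List[int], walls: List[int]) -> int:
-- 	robots_sorted = []
-- 	for i in range(len(robots)):
-- 		robots_sorted.append([robots[i], distance[i], i])
-- 	robots_sorted.sort()
-- 	robots_sorted.insert(0, [-float('inf'), 0])
-- 	robots_sorted.append([float('inf'), 0])
-- 	walls.sort()
-- 	L, R = [], []
-- 	for i in range(1, len(robots_sorted) - 1):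
-- 		curr = robots_sorted[i][0]
-- 		dist = robots_sorted[i][1]
--
-- 		left_robot = max(robots_sorted[i - 1][0], curr - dist)
-- 		right_robot = min(robots_sorted[i + 1][0], curr + dist)
--
-- 		idx_l_start = bisect_left(walls, left_robot)
-- 		idx_l_end = bisect_right(walls, curr)
-- 		count_l = idx_l_end - idx_l_start
--
-- 		idx_r_start = bisect_left(walls, curr)
-- 		idx_r_end = bisect_right(walls, right_robot)
-- 		count_r = idx_r_end - idx_r_start
--
-- 		L.append(count_l)
-- 		R.append(count_r)
-- 	f_left = L[0]
-- 	f_right = R[0]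
-- 	for i in range(1, len(robots)):
-- 		best_before = max(f_left, f_right)
-- 		f_left = best_before + L[i]
-- 		f_right = best_before + R[i]
-- 	return max(f_left, f_right)
-- ===== SOURCE B (Python) =====
-- from bisect import bisect_left, bisect_right
--
-- def maxWalls(robots, distance, walls):
--     # One pass over the robots sorted by (position, distance, index): the two-track
--     # DP of the original collapses to a running sum of max(left count, right count).
--     pts = sorted((robots[i], distance[i], i) for i in range(len(robots)))
--     walls.sort()
--     total = 0
--     m = len(pts)
--     for i in range(m):
--         r, d = pts[i][0], pts[i][1]
--         lo = max(pts[i - 1][0], r - d) if i > 0 else r - d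
--         hi = min(pts[i + 1][0], r + d) if i + 1 < m else r + d
--         total += max(bisect_right(walls, r) - bisect_left(walls, lo),
--                      bisect_right(walls, hi) - bisect_left(walls, r))
--     return total
-- ===== Notes on version B (the rewrite author's own statement) =====
-- stated objective: simpler
-- what changed: B drops A's L/R count lists and the two-track left/right DP entirely: since both DP tracks share the same best_before, the DP collapses, so B accumulates max(left count, right count) per robot in a single pass over the sorted robots (same sort and bisect counts).
import Mathlib
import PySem

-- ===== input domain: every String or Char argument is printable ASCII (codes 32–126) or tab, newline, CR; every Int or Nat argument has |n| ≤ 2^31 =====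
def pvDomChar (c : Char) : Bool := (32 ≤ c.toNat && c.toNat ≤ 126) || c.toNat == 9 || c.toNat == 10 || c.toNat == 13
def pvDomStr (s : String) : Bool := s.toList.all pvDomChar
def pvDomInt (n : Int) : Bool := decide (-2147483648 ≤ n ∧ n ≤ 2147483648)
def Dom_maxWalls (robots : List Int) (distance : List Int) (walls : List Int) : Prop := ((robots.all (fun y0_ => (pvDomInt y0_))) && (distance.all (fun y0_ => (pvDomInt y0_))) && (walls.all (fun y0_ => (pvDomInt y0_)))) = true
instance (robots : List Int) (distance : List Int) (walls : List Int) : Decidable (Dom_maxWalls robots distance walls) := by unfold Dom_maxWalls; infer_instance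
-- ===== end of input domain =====

-- B collapses A's two-track DP into a single running sum of max(left count, right count)
-- per sorted robot (objective: simpler). Both Pythons sort `walls` in place; the equivalence
-- proved here is about the RETURN value (B performs the same in-place sort).

-- ===== PORT A =====
-- bisect_left / bisect_right are PySem.List.bisectLeft / bisectRight.
-- Python sorts the triples [robot, distance, i] lexicographically; the third component i is
-- the build position, strictly increasing, so the STABLE sort by the key pair (robot, distance)
-- (PySem.List.sorted2) is exact.  The sentinels [-inf, 0] / [inf, 0] make
-- max(-inf, x) = x and min(inf, x) = x at the two ends; PySem has no float inf, so the
-- sentinel reads are encoded by the i = 1 / i = len branches (exact, step for step).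
-- the body of A's count loop, named so the proofs can speak about the fold (verbatim A)
def maxWallsLoopBody (s : List (Int × Int × Int)) (ws : List Int)
    (p : List Int × List Int) (i : Int) : List Int × List Int :=
  let t := PySem.List.pyGetD s (i - 1) (0, 0, 0)
  let curr := t.1
  let dist := t.2.1
  let leftR := if i = 1 then curr - dist
               else max (PySem.List.pyGetD s (i - 2) (0, 0, 0)).1 (curr - dist)
  let rightR := if i = (s.length : Int) then curr + dist
                else min (PySem.List.pyGetD s i (0, 0, 0)).1 (curr + dist)
  (p.1 ++ [((PySem.List.bisectRight ws curr : Int) - (PySem.List.bisectLeft ws leftR : Int))],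
   p.2 ++ [((PySem.List.bisectRight ws rightR : Int) - (PySem.List.bisectLeft ws curr : Int))])

def maxWalls (robots : List Int) (distance : List Int) (walls : List Int) : Int :=
  let rs := (PySem.List.pyRange 0 (robots.length : Int) 1).foldl
      (fun acc i => acc ++ [(PySem.List.pyGetD robots i 0, PySem.List.pyGetD distance i 0, i)]) []
  let s := PySem.List.sorted2 rs (fun t => t.1) (fun t => t.2.1)
  let ws := PySem.List.sorted walls (fun x => x)      -- walls.sort()
  let LR := (PySem.List.pyRange 1 ((s.length : Int) + 1) 1).foldl (maxWallsLoopBody s ws) ([], [])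
  -- L[0] / R[0]: IndexError when robots = [] — excluded by Pre_maxWalls
  let fl0 := PySem.List.pyGetD LR.1 0 0
  let fr0 := PySem.List.pyGetD LR.2 0 0
  let fin := (PySem.List.pyRange 1 (robots.length : Int) 1).foldl
      (fun (f : Int × Int) i =>
        let best := max f.1 f.2
        (best + PySem.List.pyGetD LR.1 i 0, best + PySem.List.pyGetD LR.2 i 0))
      (fl0, fr0)
  max fin.1 fin.2

-- ===== PORT B =====
-- same sort comment as for A: the generator yields (robots[i], distance[i], i) with i the
-- position, so sorted2 by (robot, distance) is the exact lexicographic triple sort.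
def maxWalls_alt (robots : List Int) (distance : List Int) (walls : List Int) : Int :=
  let pts := PySem.List.sorted2
      ((PySem.List.pyRange 0 (robots.length : Int) 1).map
        (fun i => (PySem.List.pyGetD robots i 0, PySem.List.pyGetD distance i 0, i)))
      (fun t => t.1) (fun t => t.2.1)
  let ws := PySem.List.sorted walls (fun x => x)      -- walls.sort()
  (PySem.List.pyRange 0 ((pts.length : Int)) 1).foldl
    (fun total i =>
      let t := PySem.List.pyGetD pts i (0, 0, 0)
      let r := t.1
      let d := t.2.1
      let lo := if 0 < i then max (PySem.List.pyGetD pts (i - 1) (0, 0, 0)).1 (r - d) else r - d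
      let hi := if i + 1 < (pts.length : Int) then
                  min (PySem.List.pyGetD pts (i + 1) (0, 0, 0)).1 (r + d)
                else r + d
      total + max ((PySem.List.bisectRight ws r : Int) - (PySem.List.bisectLeft ws lo : Int))
                  ((PySem.List.bisectRight ws hi : Int) - (PySem.List.bisectLeft ws r : Int)))
    0

-- ===== PRECONDITION & SPEC =====
-- Pre_ excludes exactly the inputs on which the Python A raises IndexError:
-- empty robots (L[0]) and distance shorter than robots (distance[i]).
def Pre_maxWalls (robots : List Int) (distance : List Int) (walls : List Int) : Prop :=
  robots ≠ [] ∧ robots.length ≤ distance.length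
instance (robots : List Int) (distance : List Int) (walls : List Int) :
    Decidable (Pre_maxWalls robots distance walls) := by unfold Pre_maxWalls; infer_instance

def pvWitness_maxWalls : List Int × List Int × List Int := ([2, 7], [1, 2], [1, 3, 8])

def Spec_maxWalls (robots : List Int) (distance : List Int) (walls : List Int) (out : Int) : Prop := out = maxWalls_alt robots distance walls
instance (robots : List Int) (distance : List Int) (walls : List Int) (out : Int) : Decidable (Spec_maxWalls robots distance walls out) := by unfold Spec_maxWalls; infer_instance

-- ===== CLAIM (what is proved, stated in full; the proofs are below) =====
def Claim_equal_maxWalls : Prop := ∀ (robots : List Int) (distance : List Int) (walls : List Int), Dom_maxWalls robots distance walls → Pre_maxWalls robots distance walls → Spec_maxWalls robots distance walls (maxWalls robots distance walls)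


-- ===== LEMMAS AND PROOFS =====

-- the sorted decorated robots (shared shape of both ports)
def pvS (robots : List Int) (distance : List Int) : List (Int × Int × Int) :=
  PySem.List.sorted2
    ((PySem.List.pyRange 0 (robots.length : Int) 1).map
      (fun i => (PySem.List.pyGetD robots i 0, PySem.List.pyGetD distance i 0, i)))
    (fun t => t.1) (fun t => t.2.1)

-- per-robot left/right wall counts, written exactly as B computes them (index j from 0)
def pvCL (s : List (Int × Int × Int)) (ws : List Int) (j : Int) : Int :=
  let t := PySem.List.pyGetD s j (0, 0, 0)
  let lo := if 0 < j then max (PySem.List.pyGetD s (j - 1) (0, 0, 0)).1 (t.1 - t.2.1)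
            else t.1 - t.2.1
  (PySem.List.bisectRight ws t.1 : Int) - (PySem.List.bisectLeft ws lo : Int)

def pvCR (s : List (Int × Int × Int)) (ws : List Int) (j : Int) : Int :=
  let t := PySem.List.pyGetD s j (0, 0, 0)
  let hi := if j + 1 < (s.length : Int) then
              min (PySem.List.pyGetD s (j + 1) (0, 0, 0)).1 (t.1 + t.2.1)
            else t.1 + t.2.1
  (PySem.List.bisectRight ws hi : Int) - (PySem.List.bisectLeft ws t.1 : Int)

-- the same counts written exactly as A computes them (loop index i from 1)
def pvCLA (s : List (Int × Int × Int)) (ws : List Int) (i : Int) : Int :=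
  let t := PySem.List.pyGetD s (i - 1) (0, 0, 0)
  let curr := t.1
  let dist := t.2.1
  let leftR := if i = 1 then curr - dist
               else max (PySem.List.pyGetD s (i - 2) (0, 0, 0)).1 (curr - dist)
  (PySem.List.bisectRight ws curr : Int) - (PySem.List.bisectLeft ws leftR : Int)

def pvCRA (s : List (Int × Int × Int)) (ws : List Int) (i : Int) : Int :=
  let t := PySem.List.pyGetD s (i - 1) (0, 0, 0)
  let curr := t.1
  let dist := t.2.1
  let rightR := if i = (s.length : Int) then curr + dist
                else min (PySem.List.pyGetD s i (0, 0, 0)).1 (curr + dist)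
  (PySem.List.bisectRight ws rightR : Int) - (PySem.List.bisectLeft ws curr : Int)

lemma foldl_pair_append {α β γ : Type} (l : List α) (F : α → β) (G : α → γ)
    (f : List β × List γ → α → List β × List γ)
    (hf : ∀ p x, f p x = (p.1 ++ [F x], p.2 ++ [G x])) :
    l.foldl f ([], []) = (l.map F, l.map G) := by
  have key : ∀ (a : List β) (b : List γ), l.foldl f (a, b) = (a ++ l.map F, b ++ l.map G) := by
    induction l with
    | nil => simp
    | cons x t ih => intro a b; simp [hf, ih]
  simpa using key [] []

lemma map_pyRange_shift {α : Type} (F : Int → α) (m : Int) :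
    (PySem.List.pyRange 1 (m + 1) 1).map F
      = (PySem.List.pyRange 0 m 1).map (fun j => F (j + 1)) := by
  rw [PySem.List.pyRange_one, PySem.List.pyRange_one]
  simp only [List.map_map, add_sub_cancel_right, sub_zero]
  exact List.map_congr_left (fun k _ => by simp [add_comm])

lemma pvCLA_shift (s : List (Int × Int × Int)) (ws : List Int) (j : Int) (hj : 0 ≤ j) :
    pvCLA s ws (j + 1) = pvCL s ws j := by
  simp only [pvCLA, pvCL, add_sub_cancel_right, show j + 1 - 2 = j - 1 by ring]
  by_cases h : 0 < j
  · rw [if_neg (by omega), if_pos h]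
  · rw [if_pos (by omega), if_neg h]

lemma pvCRA_shift (s : List (Int × Int × Int)) (ws : List Int) (j : Int)
    (hjm : j < (s.length : Int)) : pvCRA s ws (j + 1) = pvCR s ws j := by
  simp only [pvCRA, pvCR, add_sub_cancel_right]
  by_cases h : j + 1 < (s.length : Int)
  · rw [if_neg (by omega), if_pos h]
  · rw [if_pos (by omega), if_neg h]

lemma length_pvS (robots distance : List Int) :
    ((pvS robots distance).length : Int) = (robots.length : Int) := by
  unfold pvS
  rw [(PySem.List.sorted2_perm _ _ _ _).length_eq]
  simp [PySem.List.length_pyRange_one]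

-- A's collapsing DP: max of the two final tracks = running sum of pointwise maxes
lemma dp_sum (cl cr : Int → Int) (n : Nat) :
    (let F := (PySem.List.pyRange 1 ((n : Int) + 1) 1).foldl
        (fun (f : Int × Int) i => (max f.1 f.2 + cl i, max f.1 f.2 + cr i)) (cl 0, cr 0)
     max F.1 F.2)
      = ((PySem.List.pyRange 0 ((n : Int) + 1) 1).map (fun j => max (cl j) (cr j))).sum := by
  induction n with
  | zero =>
      rw [show ((0:Nat):Int) + 1 = 0 + 1 by norm_num, PySem.List.pyRange_one_eq_nil (by omega),
          PySem.List.pyRange_one_singleton]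
      simp
  | succ k ih =>
      have h1 : ((k+1 : Nat) : Int) + 1 = ((k:Int) + 1) + 1 := by push_cast; ring
      rw [h1, PySem.List.pyRange_one_succ_right (a := 1) (b := (k:Int)+1) (by omega),
          PySem.List.pyRange_one_succ_right (a := 0) (b := (k:Int)+1) (by omega)]
      simp only [List.foldl_append, List.foldl_cons, List.foldl_nil, List.map_append,
                 List.map_cons, List.map_nil, List.sum_append, List.sum_cons, List.sum_nil]
      simp only at ih
      omega

lemma B_eq (robots distance walls : List Int) :
    maxWalls_alt robots distance walls
      = ((PySem.List.pyRange 0 ((pvS robots distance).length : Int) 1).map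
          (fun j => max (pvCL (pvS robots distance) (PySem.List.sorted walls (fun x => x)) j)
                        (pvCR (pvS robots distance) (PySem.List.sorted walls (fun x => x)) j))).sum := by
  show (PySem.List.pyRange 0 ((pvS robots distance).length : Int) 1).foldl
      (fun total i => total + max (pvCL (pvS robots distance) (PySem.List.sorted walls (fun x => x)) i)
                                  (pvCR (pvS robots distance) (PySem.List.sorted walls (fun x => x)) i)) 0 = _
  rw [PySem.List.foldl_add (g := fun i =>
        max (pvCL (pvS robots distance) (PySem.List.sorted walls (fun x => x)) i)
            (pvCR (pvS robots distance) (PySem.List.sorted walls (fun x => x)) i))]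
  simp

lemma A_eq (robots distance walls : List Int) (h : robots ≠ []) :
    maxWalls robots distance walls
      = ((PySem.List.pyRange 0 ((pvS robots distance).length : Int) 1).map
          (fun j => max (pvCL (pvS robots distance) (PySem.List.sorted walls (fun x => x)) j)
                        (pvCR (pvS robots distance) (PySem.List.sorted walls (fun x => x)) j))).sum := by
  have hn : robots.length ≠ 0 := fun h0 => h (List.eq_nil_of_length_eq_zero h0)
  have hm := length_pvS robots distance
  simp only [maxWalls, PySem.List.foldl_append_singleton_eq_map, List.nil_append]
  rw [show PySem.List.sorted2
        ((PySem.List.pyRange 0 (robots.length : Int) 1).map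
          (fun i => (PySem.List.pyGetD robots i 0, PySem.List.pyGetD distance i 0, i)))
        (fun t => t.1) (fun t => t.2.1) = pvS robots distance from rfl]
  rw [foldl_pair_append _ (pvCLA (pvS robots distance) (PySem.List.sorted walls (fun x => x)))
        (pvCRA (pvS robots distance) (PySem.List.sorted walls (fun x => x)))
        (maxWallsLoopBody (pvS robots distance) (PySem.List.sorted walls (fun x => x)))
        (fun p x => rfl)]
  dsimp only
  rw [map_pyRange_shift, map_pyRange_shift,
      List.map_congr_left (fun j hj =>
        pvCLA_shift (pvS robots distance) (PySem.List.sorted walls (fun x => x)) j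
          ((PySem.List.mem_pyRange_one.mp hj).1)),
      List.map_congr_left (fun j hj =>
        pvCRA_shift (pvS robots distance) (PySem.List.sorted walls (fun x => x)) j
          ((PySem.List.mem_pyRange_one.mp hj).2))]
  rw [hm]
  have hn' : (0 : Int) < (robots.length : Int) := by exact_mod_cast Nat.pos_of_ne_zero hn
  rw [PySem.List.pyGetD_map_pyRange_of_nonneg _ _ _ _ (le_refl 0) hn',
      PySem.List.pyGetD_map_pyRange_of_nonneg _ _ _ _ (le_refl 0) hn']
  have hcongr : ∀ (acc : Int × Int) (i : Int), i ∈ PySem.List.pyRange 1 (robots.length : Int) 1 →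
      (max acc.1 acc.2 +
         PySem.List.pyGetD ((PySem.List.pyRange 0 (robots.length : Int) 1).map
           (pvCL (pvS robots distance) (PySem.List.sorted walls (fun x => x)))) i 0,
       max acc.1 acc.2 +
         PySem.List.pyGetD ((PySem.List.pyRange 0 (robots.length : Int) 1).map
           (pvCR (pvS robots distance) (PySem.List.sorted walls (fun x => x)))) i 0)
      = (max acc.1 acc.2 + pvCL (pvS robots distance) (PySem.List.sorted walls (fun x => x)) i,
         max acc.1 acc.2 + pvCR (pvS robots distance) (PySem.List.sorted walls (fun x => x)) i) := by
    intro acc i hi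
    obtain ⟨h1, h2⟩ := PySem.List.mem_pyRange_one.mp hi
    rw [PySem.List.pyGetD_map_pyRange_of_nonneg _ _ _ _ (by omega) h2,
        PySem.List.pyGetD_map_pyRange_of_nonneg _ _ _ _ (by omega) h2]
  rw [PySem.List.foldl_congr_mem _ _ _ _ hcongr]
  obtain ⟨k, hk⟩ := Nat.exists_eq_succ_of_ne_zero hn
  rw [hk, show ((k + 1 : Nat) : Int) = (k : Int) + 1 by push_cast; ring]
  simpa using dp_sum (pvCL (pvS robots distance) (PySem.List.sorted walls (fun x => x)))
    (pvCR (pvS robots distance) (PySem.List.sorted walls (fun x => x))) k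

-- ===== VERDICT (by name: the statement is the Claim_ definition above) =====
theorem maxWalls_spec : Claim_equal_maxWalls := by
  intro robots distance walls _hdom hpre
  unfold Spec_maxWalls
  rw [A_eq robots distance walls hpre.1, B_eq]
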